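-- pv_equiv track=rewrite | github.com/hedgehog-hg/OperatingSystem | codeSignal/eruptionOfLight.py | buildPalindrome
-- ===== SOURCE A (Python) =====
-- def buildPalindrome(st):
--     post =''
--     for idx in range(len(st)-1):
--         if st.count(st[idx]) > 1 and checkPalindrome(st[idx:]) :
--             break
--         else :
--             post += st[idx]
--     return st+post[::-1]
--
-- def checkPalindrome(str):
--     l = len(str)-1
--     for i in range(len(str)//2) :
--         if str[i] != str[l] :
--             return False
--         l-=1
--     return True
-- ===== SOURCE B (Python) =====
-- def buildPalindrome(st):
--     # Maintain, left to right, the ascending list of start indices of all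
--     # palindromic substrings ending at the current position (a palindromic-
--     # suffix automaton pass); the final list gives every palindromic suffix
--     # of st, so no per-index palindrome re-check or character count is needed
--     # (a palindromic suffix of length >= 2 repeats its first character).
--     n = len(st)
--     starts = []
--     for j in range(n):
--         starts = [i - 1 for i in starts + [j] if i > 0 and st[i - 1] == st[j]] + [j]
--     k = next((i for i in starts if i < n - 1), n - 1)
--     return st + st[:k][::-1]
-- ===== Notes on version B (the rewrite author's own statement) =====
-- stated objective: faster
-- what changed: B drops A's per-index work (an O(n) st.count scan plus a suffix-palindrome re-check per index) for a single left-to-right pass maintaining the list of start indices of all palindromic substrings ending at the current position (starts_j = [i-1 for i in starts_{j-1}+[j] if i>0 and st[i-1]==st[j]] + [j]); the final list is exactly the palindromic suffixes and the first start below n-1 gives the prefix to mirror; the count test disappears because a length>=2 palindromic suffix always repeats its first character.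
import Mathlib
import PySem

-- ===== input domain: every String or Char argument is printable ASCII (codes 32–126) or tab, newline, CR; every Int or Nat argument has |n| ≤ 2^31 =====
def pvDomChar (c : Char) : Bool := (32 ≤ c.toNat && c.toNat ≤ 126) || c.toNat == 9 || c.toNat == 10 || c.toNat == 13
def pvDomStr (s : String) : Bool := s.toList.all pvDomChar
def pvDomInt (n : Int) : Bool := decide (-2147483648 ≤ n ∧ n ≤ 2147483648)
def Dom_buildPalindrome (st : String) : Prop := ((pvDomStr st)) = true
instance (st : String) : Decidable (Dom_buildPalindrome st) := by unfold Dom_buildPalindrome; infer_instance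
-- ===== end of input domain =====

-- B (measurably faster) replaces A's per-index suffix-palindrome re-check and redundant st.count scan by one
-- left-to-right pass maintaining the start indices of all palindromic substrings ending at the
-- current position; the final list names all palindromic suffixes, from which the answer is read off.

-- ===== PORT A =====
-- checkPalindrome's loop: for i in range(len(str)//2): compare str[i] with str[l], l decreasing
-- (indices are always in range, so pyGetD with a default is exact here)
def pvCheckGo (s : List Char) : List Int → Int → Bool
  | [], _ => true
  | i :: rest, l =>
    if PySem.List.pyGetD s i ' ' ≠ PySem.List.pyGetD s l ' ' then false
    else pvCheckGo s rest (l - 1)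

def pvCheckPalindrome (s : List Char) : Bool :=
  pvCheckGo s (PySem.List.pyRange 0 (PySem.Int.floordiv (s.length : Int) 2) 1) ((s.length : Int) - 1)

-- A's main loop over range(len(st)-1), accumulating post until the break condition fires
def pvALoop (cs : List Char) : List Int → List Char → List Char
  | [], post => post
  | idx :: rest, post =>
    let c := PySem.List.pyGetD cs idx ' '
    if decide (PySem.Chars.count cs [c] > 1) && pvCheckPalindrome (PySem.List.slice cs (some idx) none)
    then post
    else pvALoop cs rest (post ++ [c])

def buildPalindrome (st : String) : String :=
  let cs := st.toList
  let post := pvALoop cs (PySem.List.pyRange 0 ((cs.length : Int) - 1) 1) []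
  String.ofList (cs ++ ((PySem.List.slice? post none none (-1)).getD []))

-- ===== PORT B =====
-- one step of B's loop body: starts = [i-1 for i in starts + [j] if i > 0 and st[i-1] == st[j]] + [j]
-- (st[i-1] and st[j] are always in range here — i > 0 is tested first and j < len(st) — so pyGetD is exact)
def pvBStep (cs : List Char) (starts : List Int) (j : Int) : List Int :=
  ((starts ++ [j]).filter
      (fun i => decide (i > 0) && (PySem.List.pyGetD cs (i - 1) ' ' == PySem.List.pyGetD cs j ' '))).map
    (fun i => i - 1) ++ [j]

def buildPalindrome_alt (st : String) : String :=
  let cs := st.toList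
  let n : Int := (cs.length : Int)
  let starts := (PySem.List.pyRange 0 n 1).foldl (pvBStep cs) []
  -- next((i for i in starts if i < n - 1), n - 1)
  let k := (starts.find? (fun i => decide (i < n - 1))).getD (n - 1)
  String.ofList (cs ++ ((PySem.List.slice? (PySem.List.slice cs none (some k)) none none (-1)).getD []))

-- ===== PRECONDITION & SPEC =====
def Spec_buildPalindrome (st : String) (out : String) : Prop := out = buildPalindrome_alt st
instance (st : String) (out : String) : Decidable (Spec_buildPalindrome st out) := by unfold Spec_buildPalindrome; infer_instance

-- ===== CLAIM (what is proved, stated in full; the proofs are below) =====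
def Claim_equal_buildPalindrome : Prop := ∀ (st : String), Dom_buildPalindrome st → Spec_buildPalindrome st (buildPalindrome st)

-- ===== LEMMAS AND PROOFS =====

-- pvQ cs j i: the substring st[i:j] is a palindrome
def pvQ (cs : List Char) (j i : Nat) : Bool := decide ((cs.take j).drop i = ((cs.take j).drop i).reverse)

-- find? is congruent on members (no library lemma)
theorem pvFind?_congr {α : Type} (l : List α) (p q : α → Bool) (h : ∀ x ∈ l, p x = q x) :
    l.find? p = l.find? q := by
  induction l with
  | nil => rfl
  | cons x t ih =>
    simp only [List.find?_cons, h x (by simp)]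
    cases hq : q x
    · exact ih (fun y hy => h y (by simp [hy]))
    · rfl

-- find? with a predicate true on every member returns the head (no library lemma)
theorem pvFind?_of_all {α : Type} (l : List α) (p : α → Bool) (h : ∀ x ∈ l, p x = true) :
    l.find? p = l.head? := by
  cases l with
  | nil => rfl
  | cons x t => simp [h x (by simp)]

-- a :: (m ++ [b]) is a palindrome iff a = b and m is one
theorem pvPal_cons_append (a b : Char) (m : List Char) :
    (a :: (m ++ [b]) = (a :: (m ++ [b])).reverse) ↔ (a = b ∧ m = m.reverse) := by
  constructor
  · intro h
    rw [List.reverse_cons, List.reverse_append, List.reverse_singleton] at h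
    have hcons : a :: (m ++ [b]) = b :: (m.reverse ++ [a]) := by simpa using h
    have hab : a = b := (List.cons_eq_cons.mp hcons).1
    have htail : m ++ [b] = m.reverse ++ [a] := (List.cons_eq_cons.mp hcons).2
    have hlen : m.length = m.reverse.length := by simp
    exact ⟨hab, (List.append_inj htail hlen).1⟩
  · rintro ⟨rfl, hm⟩
    conv_lhs => rw [hm]
    simp

-- the palindromicity recurrence: st[i:j+1] pal ↔ st[i] = st[j] ∧ st[i+1:j] pal, for i < j < len
theorem pvQ_succ (cs : List Char) (j i : Nat) (hij : i < j) (hj : j < cs.length) :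
    pvQ cs (j + 1) i = ((cs.getD i ' ' == cs.getD j ' ') && pvQ cs j (i + 1)) := by
  have htake : cs.take (j + 1) = cs.take j ++ [cs[j]] := by
    rw [List.take_add_one, List.getElem?_eq_getElem hj]; rfl
  have hlen : (cs.take j).length = j := List.length_take_of_le (by omega)
  have hdrop : (cs.take (j + 1)).drop i = cs[i] :: ((cs.take j).drop (i + 1) ++ [cs[j]]) := by
    rw [htake, List.drop_append_of_le_length (by omega),
      List.drop_eq_getElem_cons (by omega : i < (cs.take j).length)]
    simp [List.getElem_take]
  rw [pvQ, hdrop]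
  rw [Bool.eq_iff_iff]
  rw [decide_eq_true_iff, pvPal_cons_append, pvQ]
  rw [List.getD_eq_getElem cs ' ' (by omega), List.getD_eq_getElem cs ' ' hj]
  simp [and_comm]

-- one loop step of B moves the palindromic-ends-before-j list on to j+1
theorem pvBStep_spec (cs : List Char) (j : Nat) (hj : j < cs.length) :
    pvBStep cs (((List.range j).filter (pvQ cs j)).map (fun i : Nat => (i : Int))) (j : Int)
      = ((List.range (j + 1)).filter (pvQ cs (j + 1))).map (fun i : Nat => (i : Int)) := by
  have hlenT : (cs.take j).length = j := List.length_take_of_le (le_of_lt hj)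
  have htake : cs.take (j+1) = cs.take j ++ [cs[j]] := by
    rw [List.take_add_one, List.getElem?_eq_getElem hj]; rfl
  have hQjj : pvQ cs j j = true := by
    simp [pvQ, List.drop_eq_nil_of_le (le_of_eq hlenT)]
  have hQj1 : pvQ cs (j+1) j = true := by
    rw [pvQ, htake, List.drop_append_of_le_length (le_of_eq hlenT.symm),
      List.drop_eq_nil_of_le (le_of_eq hlenT)]
    simp
  unfold pvBStep
  rw [show ((((List.range j).filter (pvQ cs j)).map (fun i : Nat => (i : Int))) ++ [(j:Int)])
        = ((List.range (j+1)).filter (pvQ cs j)).map (fun i : Nat => (i : Int)) by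
    rw [List.range_succ, List.filter_append]; simp [hQjj]]
  rw [List.filter_map, List.map_map, List.filter_filter]
  rw [List.filter_congr (q := fun i : Nat =>
        decide (0 < i) && ((cs.getD (i-1) ' ' == cs.getD j ' ') && pvQ cs j i)) ?hcg]
  case hcg =>
    intro i hi
    have hij : i < j + 1 := by simpa using List.mem_range.mp hi
    cases i with
    | zero => simp
    | succ m =>
      have h1 : ((m+1 : Nat) : Int) - 1 = ((m : Nat) : Int) := by omega
      simp only [Function.comp_apply, h1, PySem.List.pyGetD_natCast]
      simp
  rw [List.map_congr_left (g := fun i : Nat => ((i - 1 : Nat) : Int)) ?hmc]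
  case hmc =>
    intro i hi
    have h0 : 0 < i := by
      have := List.of_mem_filter hi
      simpa using (Bool.and_eq_true_iff.mp this).1
    simp only [Function.comp_apply]
    omega
  rw [List.range_succ_eq_map, List.filter_cons]
  simp only [lt_irrefl, decide_false, Bool.false_and, if_neg (by simp : ¬(false = true))]
  rw [List.filter_map, List.map_map]
  have hid : ((fun i : Nat => ((i - 1 : Nat) : Int)) ∘ Nat.succ) = (fun i : Nat => (i : Int)) := by
    funext i; simp
  rw [hid]
  rw [List.filter_congr (q := fun i : Nat => pvQ cs (j+1) i) ?hcg2]
  case hcg2 =>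
    intro i hi
    have hij : i < j := List.mem_range.mp hi
    simp only [Function.comp_apply]
    rw [pvQ_succ cs j i hij hj]
    simp
  rw [show (0 :: List.map Nat.succ (List.range j)) = List.range (j+1) from (List.range_succ_eq_map (n := j)).symm,
    List.range_succ, List.filter_append]
  simp [hQj1]

-- the loop invariant: after j steps, starts lists the starts of palindromic substrings ending before j
theorem pvBInv (cs : List Char) : ∀ j : Nat, j ≤ cs.length →
    (PySem.List.pyRange 0 (j : Int) 1).foldl (pvBStep cs) []
      = ((List.range j).filter (pvQ cs j)).map (fun i : Nat => (i : Int)) := by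
  intro j
  induction j with
  | zero => intro _; rw [PySem.List.pyRange_one_eq_nil (by omega)]; rfl
  | succ m ih =>
    intro h
    have hc : ((m + 1 : Nat) : Int) = (m : Int) + 1 := by omega
    rw [hc, PySem.List.pyRange_one_succ_right (by omega), List.foldl_append,
      ih (by omega), List.foldl_cons, List.foldl_nil, pvBStep_spec cs m (by omega)]

-- str.count with a single-character needle is the element count
theorem pvCountGo_singleton (c : Char) : ∀ (fuel : Nat) (l : List Char) (acc : Nat),
    l.length ≤ fuel → PySem.Chars.count.go [c] fuel l acc = acc + l.count c := by
  intro fuel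
  induction fuel with
  | zero => intro l acc h; have : l = [] := by cases l <;> simp_all
            subst this; simp [PySem.Chars.count.go]
  | succ n ih =>
    intro l acc h
    cases l with
    | nil => simp [PySem.Chars.count.go]
    | cons x t =>
      rw [PySem.Chars.count.go]
      by_cases hx : x = c
      · subst hx
        simp [List.isPrefixOf, ih t _ (by simpa using h)]
        omega
      · simp [List.isPrefixOf, hx, ih t _ (by simpa using h), Ne.symm hx]

theorem pvCount_singleton (c : Char) (s : List Char) :
    PySem.Chars.count s [c] = s.count c := by
  simp [PySem.Chars.count, pvCountGo_singleton c s.length s 0 le_rfl]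

theorem pvFloordiv_natCast (a b : Nat) :
    PySem.Int.floordiv (a : Int) (b : Int) = ((a / b : Nat) : Int) := by
  simp [PySem.Int.floordiv, Int.fdiv_eq_ediv]

-- the two-pointer loop checks exactly the first half against the mirrored positions
theorem pvCheckGo_spec (s : List Char) : ∀ (k j : Nat), j + k = s.length / 2 →
    pvCheckGo s (PySem.List.pyRange (j : Int) ((s.length / 2 : Nat) : Int) 1) ((s.length : Int) - 1 - (j : Int))
      = decide (∀ t, j ≤ t → t < s.length / 2 → s.getD t ' ' = s.getD (s.length - 1 - t) ' ') := by
  intro k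
  induction k with
  | zero =>
    intro j hj
    rw [PySem.List.pyRange_one_eq_nil (by omega)]
    simp only [pvCheckGo]
    symm
    simp only [decide_eq_true_eq]
    intro t h1 h2; omega
  | succ n ih =>
    intro j hj
    have hjlt : j < s.length / 2 := by omega
    have hlen : j < s.length := by omega
    have hmir : s.length - 1 - j < s.length := by omega
    rw [PySem.List.pyRange_one_cons (by exact_mod_cast by omega)]
    simp only [pvCheckGo]
    have e1 : PySem.List.pyGetD s (j : Int) ' ' = s.getD j ' ' := by
      simp [PySem.List.pyGetD_natCast]
    have ecast : ((s.length : Int) - 1 - (j : Int)) = ((s.length - 1 - j : Nat) : Int) := by omega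
    have e2 : PySem.List.pyGetD s ((s.length : Int) - 1 - (j : Int)) ' ' = s.getD (s.length - 1 - j) ' ' := by
      rw [ecast]; simp [PySem.List.pyGetD_natCast]
    rw [e1, e2]
    by_cases hne : s.getD j ' ' = s.getD (s.length - 1 - j) ' '
    · have hcast : ((j : Int) + 1) = ((j + 1 : Nat) : Int) := by omega
      have e3 : ((s.length : Int) - 1 - (j : Int) - 1) = ((s.length : Int) - 1 - ((j+1 : Nat) : Int)) := by
        push_cast; ring
      rw [if_neg (not_not_intro hne), hcast, e3, ih (j+1) (by omega)]
      congr 1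
      simp only [eq_iff_iff] at *
      constructor
      · intro h t h1 h2
        rcases Nat.eq_or_lt_of_le h1 with rfl | hl
        · exact hne
        · exact h t hl h2
      · intro h t h1 h2; exact h t (by omega) h2
    · rw [if_pos hne]
      symm
      simp only [decide_eq_false_iff_not]
      intro hall
      exact hne (hall j le_rfl hjlt)

theorem pvHalf_iff (s : List Char) :
    (∀ t, t < s.length / 2 → s.getD t ' ' = s.getD (s.length - 1 - t) ' ') ↔ s = s.reverse := by
  constructor
  · intro h
    apply List.ext_getElem (by simp)
    intro i h1 h2
    have hlen : i < s.length := h1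
    rw [List.getElem_reverse]
    by_cases hi : i < s.length / 2
    · have := h i hi
      rwa [List.getD_eq_getElem s ' ' hlen, List.getD_eq_getElem s ' ' (by omega)] at this
    · by_cases hj : s.length - 1 - i < s.length / 2
      · have := h _ hj
        rw [List.getD_eq_getElem s ' ' (by omega), List.getD_eq_getElem s ' ' (by omega)] at this
        have e : s.length - 1 - (s.length - 1 - i) = i := by omega
        simp_rw [e] at this
        exact this.symm
      · have : s.length - 1 - i = i := by omega
        simp_rw [this]
  · intro h t ht
    conv_lhs => rw [h]
    rw [List.getD_eq_getElem?_getD, List.getD_eq_getElem?_getD,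
      List.getElem?_reverse (by omega)]

theorem pvCheckPalindrome_eq (s : List Char) :
    pvCheckPalindrome s = (s == s.reverse) := by
  unfold pvCheckPalindrome
  have h2 : ((2:Int)) = ((2:Nat) : Int) := by norm_num
  rw [h2, pvFloordiv_natCast]
  have h0 : (0 : Int) = ((0:Nat) : Int) := by norm_num
  have hsub : (s.length : Int) - 1 = (s.length : Int) - 1 - ((0:Nat) : Int) := by simp
  rw [h0, hsub, pvCheckGo_spec s (s.length / 2) 0 (by omega)]
  rw [Bool.eq_iff_iff]
  simp only [decide_eq_true_eq, beq_iff_eq]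
  rw [← pvHalf_iff]
  constructor
  · intro h t ht; exact h t (Nat.zero_le t) ht
  · intro h t _ ht; exact h t ht

-- A's break condition equals suffix-palindromicity (the count test is redundant:
-- a palindromic suffix of length ≥ 2 has st[i] = st[len-1], two occurrences of st[i])
theorem pvCondA_eq (cs : List Char) (i : Nat) (hi : i + 1 < cs.length) :
    (decide (PySem.Chars.count cs [PySem.List.pyGetD cs (i : Int) ' '] > 1)
      && pvCheckPalindrome (PySem.List.slice cs (some (i : Int)) none)) = pvQ cs cs.length i := by
  have hsl : PySem.List.slice cs (some (i : Int)) none = cs.drop i :=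
    PySem.List.slice_from_natCast cs i
  rw [hsl, pvCheckPalindrome_eq, pvQ, List.take_length]
  by_cases hpal : cs.drop i = (cs.drop i).reverse
  · have hget : PySem.List.pyGetD cs (i : Int) ' ' = cs.getD i ' ' :=
      PySem.List.pyGetD_natCast ..
    set c := cs.getD i ' ' with hc
    have hd : cs.drop i = c :: cs.drop (i + 1) := by
      rw [List.drop_eq_getElem_cons (by omega : i < cs.length), hc,
        List.getD_eq_getElem cs ' ' (by omega)]
    obtain ⟨d, t, hdt⟩ : ∃ d t, cs.drop (i + 1) = d :: t := by
      cases hx : cs.drop (i + 1) with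
      | nil =>
        have : (cs.drop (i + 1)).length = cs.length - (i + 1) := by simp
        rw [hx] at this; simp at this; omega
      | cons d t => exact ⟨d, t, rfl⟩
    have hmem : c ∈ cs.drop (i + 1) := by
      have hp : c :: d :: t = ((d :: t).reverse ++ [c]) := by
        have := hpal
        rw [hd, hdt] at this
        simpa using this
      have hl : (d :: t).getLast? = some c := by
        rw [← List.getLast?_cons_cons (a := c), hp, List.getLast?_concat]
      rw [hdt]
      exact List.mem_of_getLast? hl
    have hcnt2 : 2 ≤ cs.count c := by
      have hsp : cs.count c = (cs.take i).count c + (cs.drop i).count c := by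
        conv_lhs => rw [← List.take_append_drop i cs]
        exact List.count_append ..
      have hpos : 0 < (cs.drop (i + 1)).count c := List.count_pos_iff.mpr hmem
      rw [hsp, hd, List.count_cons_self]
      omega
    rw [hget, pvCount_singleton]
    have e1 : decide (cs.drop i = (cs.drop i).reverse) = true := decide_eq_true hpal
    have e2 : (cs.drop i == (cs.drop i).reverse) = true := beq_iff_eq.mpr hpal
    have e3 : decide (cs.count c > 1) = true := decide_eq_true (by omega)
    rw [e1, e2, e3]
    rfl
  · simp [hpal]

-- A's loop returns the prefix before the first index satisfying its break condition
theorem pvALoop_spec (cs : List Char) : ∀ (k : Nat) (j : Int), 0 ≤ j →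
    j + (k : Int) = (cs.length : Int) - 1 →
    pvALoop cs (PySem.List.pyRange j ((cs.length : Int) - 1) 1) (cs.take j.toNat)
      = cs.take ((((PySem.List.pyRange j ((cs.length : Int) - 1) 1).find?
          (fun i => decide (PySem.Chars.count cs [PySem.List.pyGetD cs i ' '] > 1)
            && pvCheckPalindrome (PySem.List.slice cs (some i) none))).getD
          ((cs.length : Int) - 1)).toNat) := by
  intro k
  induction k with
  | zero =>
    intro j hj0 hj
    rw [PySem.List.pyRange_one_eq_nil (by omega)]
    simp only [pvALoop, List.find?_nil, Option.getD_none]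
    congr 1
    omega
  | succ n ih =>
    intro j hj0 hj
    have hjlt : j < (cs.length : Int) - 1 := by omega
    rw [PySem.List.pyRange_one_cons (by omega)]
    simp only [pvALoop, List.find?_cons]
    by_cases hc : (decide (PySem.Chars.count cs [PySem.List.pyGetD cs j ' '] > 1)
        && pvCheckPalindrome (PySem.List.slice cs (some j) none)) = true
    · rw [if_pos hc, hc]
      simp
    · rw [if_neg hc, Bool.eq_false_iff.mpr hc]
      have hidx : j.toNat < cs.length := by omega
      have htake : cs.take j.toNat ++ [PySem.List.pyGetD cs j ' '] = cs.take (j + 1).toNat := by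
        rw [PySem.List.pyGetD_eq_getElem (xs := cs) (i := j) (d := ' ') hj0 (by omega)]
        have : (j + 1).toNat = j.toNat + 1 := by omega
        rw [this, List.take_add_one, List.getElem?_eq_getElem hidx]
        rfl
      rw [htake, ih (j + 1) (by omega) (by omega)]

-- the two programs pick the same break index
theorem pvK_eq (cs : List Char) (h1 : 1 ≤ cs.length) :
    ((PySem.List.pyRange 0 ((cs.length : Int) - 1) 1).find?
        (fun i => decide (PySem.Chars.count cs [PySem.List.pyGetD cs i ' '] > 1)
          && pvCheckPalindrome (PySem.List.slice cs (some i) none))).getD ((cs.length : Int) - 1)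
      = ((((List.range cs.length).filter (pvQ cs cs.length)).find?
          (fun i : Nat => decide ((i : Int) < (cs.length : Int) - 1))).map
            (fun i : Nat => (i : Int))).getD ((cs.length : Int) - 1) := by
  have hm1 : ((cs.length : Int) - 1) = ((cs.length - 1 : Nat) : Int) := by omega
  -- left side: find? over the casted range, with the break condition bridged to pvQ
  rw [hm1, PySem.List.pyRange_zero_natCast (cs.length - 1), List.find?_map]
  rw [pvFind?_congr (List.range (cs.length - 1)) _ (fun i : Nat => pvQ cs cs.length i) ?hbr]
  case hbr =>
    intro i hi
    have : i < cs.length - 1 := List.mem_range.mp hi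
    exact pvCondA_eq cs i (by omega)
  -- right side: drop the i < len-1 test by shrinking the range
  have hpred : (fun i : Nat => decide ((i : Int) < ((cs.length - 1 : Nat) : Int)))
      = (fun i : Nat => decide (i < cs.length - 1)) := by
    funext i; rw [decide_eq_decide]; omega
  rw [hpred]
  have hsplit : List.range cs.length = List.range (cs.length - 1) ++ [cs.length - 1] := by
    conv_lhs => rw [show cs.length = (cs.length - 1) + 1 by omega]
    exact List.range_succ
  rw [hsplit, List.filter_append, List.find?_append]
  have hnone : (([cs.length - 1].filter (pvQ cs cs.length)).find?
      (fun i : Nat => decide (i < cs.length - 1))) = none := by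
    rw [List.filter_cons]
    cases pvQ cs cs.length (cs.length - 1)
    · simp
    · simp
  rw [hnone, Option.or_none]
  have hall : ∀ x ∈ (List.range (cs.length - 1)).filter (pvQ cs cs.length),
      (fun i : Nat => decide (i < cs.length - 1)) x = true := by
    intro x hx
    have := List.mem_range.mp (List.mem_of_mem_filter hx)
    simpa using this
  conv_rhs => rw [pvFind?_of_all _ _ hall, List.head?_filter]

-- ===== VERDICT (by name: the statement is the Claim_ definition above) =====
theorem buildPalindrome_spec : Claim_equal_buildPalindrome := by
  unfold Claim_equal_buildPalindrome Spec_buildPalindrome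
  intro st _
  simp only [buildPalindrome, buildPalindrome_alt]
  by_cases h0 : st.toList.length = 0
  · have : st.toList = [] := List.eq_nil_of_length_eq_zero h0
    rw [this]
    decide
  · set cs := st.toList with hcs
    have h1 : 1 ≤ cs.length := by omega
    -- A's side
    have hA := pvALoop_spec cs (cs.length - 1) 0 le_rfl (by omega)
    simp only [Int.toNat_zero, List.take_zero] at hA
    rw [hA]
    -- B's side
    rw [pvBInv cs cs.length le_rfl, List.find?_map]
    simp only [Function.comp_def]
    rw [pvK_eq cs h1]
    set K := ((((List.range cs.length).filter (pvQ cs cs.length)).find?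
        (fun i : Nat => decide ((i : Int) < (cs.length : Int) - 1))).map
          (fun i : Nat => (i : Int))).getD ((cs.length : Int) - 1) with hK
    have hKnn : 0 ≤ K := by
      rw [hK]
      cases hf : ((List.range cs.length).filter (pvQ cs cs.length)).find?
          (fun i : Nat => decide ((i : Int) < (cs.length : Int) - 1)) with
      | none => simp; omega
      | some v => simp
    rw [PySem.List.slice?_none_none_neg_one, PySem.List.slice_to cs hKnn,
      PySem.List.slice?_none_none_neg_one]
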